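-- pv_equiv track=rewrite | github.com/N1MAG/FreqInOut | freqinout/gui/js8call_net_control_tab.py | _build_short_code_summary
-- ===== SOURCE A (Python) =====
-- from typing import List, Dict, Set, Optional
--
-- def _build_short_code_summary(calls: List[str]) -> str:
--     """
--     Build minimal unique short codes from callsigns.
--
--     Rules:
--       - If a call has a suffix (e.g. K7ABC/P), strip everything after "/" and
--         derive the short code from the base call.
--       - Start with the last 3 characters of the base call (or fewer if shorter).
--       - If duplicates collide, incrementally extend to 4, 5, ... characters
--         (up to the full base) until each code is unique.
--       - Preserve input order; return space-delimited codes.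
--     """
--     bases: List[str] = []
--     for cs in calls:
--         base = (cs or "").strip().upper()
--         if not base:
--             continue
--         if "/" in base:
--             base = base.split("/", 1)[0]
--         bases.append(base)
--
--     # Track how many chars to use from the end for each base call
--     lengths = [min(3, len(b)) if len(b) < 3 else 3 for b in bases]
--
--     # Gradually extend colliding codes until unique or max length reached
--     while True:
--         codes = [b[-lengths[i]:] for i, b in enumerate(bases)]
--         counts = {}
--         for c in codes:
--             counts[c] = counts.get(c, 0) + 1
--         duplicates = {idx for idx, c in enumerate(codes) if counts[c] > 1}
--         if not duplicates:
--             break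
--         progressed = False
--         for idx in duplicates:
--             if lengths[idx] < len(bases[idx]):
--                 lengths[idx] += 1
--                 progressed = True
--         if not progressed:
--             # Cannot disambiguate further (very short/identical bases); exit
--             break
--
--     return " ".join(bases[i][-lengths[i]:] for i in range(len(bases)))
-- ===== SOURCE B (Python) =====
-- from typing import List
--
--
-- def _common_suffix_len(x: str, y: str) -> int:
--     k = 0
--     for a, b in zip(reversed(x), reversed(y)):
--         if a != b:
--             break
--         k += 1
--     return k
--
--
-- def _build_short_code_summary(calls: List[str]) -> str:
--     bases: List[str] = []
--     for cs in calls: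
--         base = (cs or "").strip().upper()
--         if not base:
--             continue
--         if "/" in base:
--             base = base.split("/", 1)[0]
--         bases.append(base)
--
--     # Index bases of length >= 3 by their last-3-character suffix: only bases
--     # sharing that suffix can force a code longer than the initial one.
--     groups = {}
--     for j, b in enumerate(bases):
--         if len(b) >= 3:
--             groups.setdefault(b[-3:], []).append(j)
--
--     # Closed form: the final length for base b is
--     #   min(len(b), max(3, 1 + max common-suffix-length with any other base)),
--     # and for len(b) < 3 it is simply len(b).
--     out = []
--     for i, b in enumerate(bases):
--         if len(b) < 3:
--             length = len(b)
--         else: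
--             m = 0
--             for j in groups[b[-3:]]:
--                 if j != i:
--                     k = _common_suffix_len(b, bases[j])
--                     if m < k:
--                         m = k
--             length = min(len(b), max(3, m + 1))
--         out.append(b[-length:])
--     return " ".join(out)
-- ===== Notes on version B (the rewrite author's own statement) =====
-- stated objective: alternative
-- what changed: A repeatedly recomputes all codes, counts them and extends every colliding code by one character until a fixpoint; B computes each final code length directly by a closed form - min(len(base), max(3, 1 + maximum common-suffix-length with any other base)) - evaluating the pairwise suffix comparison only inside groups of bases indexed by their last-3-character suffix.
import Mathlib
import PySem

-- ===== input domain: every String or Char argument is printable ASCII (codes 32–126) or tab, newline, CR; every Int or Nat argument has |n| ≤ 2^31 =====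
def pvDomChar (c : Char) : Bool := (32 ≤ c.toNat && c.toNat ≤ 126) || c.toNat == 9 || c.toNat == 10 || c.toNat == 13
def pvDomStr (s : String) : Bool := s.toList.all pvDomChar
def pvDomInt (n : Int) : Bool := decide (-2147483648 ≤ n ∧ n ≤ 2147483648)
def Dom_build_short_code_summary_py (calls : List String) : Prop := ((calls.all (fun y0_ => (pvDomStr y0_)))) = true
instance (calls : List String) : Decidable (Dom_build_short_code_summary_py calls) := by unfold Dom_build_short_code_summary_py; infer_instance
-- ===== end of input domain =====

-- B replaces A's global extend-all-duplicates-and-retry loop by a closed form: each base's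
-- final code length is min(len(b), max(3, 1 + max common-suffix-length with any other base)),
-- computed per last-3-suffix collision group (objective: alternative algorithm, same results).

-- ===== PORT A =====
-- preprocessing: base = (cs or "").strip().upper(); skip empties; cut at first "/"
-- (textually identical in Source A and Source B, so both ports share this one helper)
def pvBases (calls : List String) : List (List Char) :=
  calls.foldl (fun bases cs =>
    let base := PySem.Chars.upper (PySem.Chars.strip cs.toList)
    if base = [] then bases
    else
      let base := if PySem.Chars.isIn ['/'] base then (PySem.Chars.splitOnMax base ['/'] 1).headD [] else base
      bases ++ [base]) []

-- codes = [b[-lengths[i]:] for i, b in enumerate(bases)]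
def pvRoundCodes (bases : List (List Char)) (lengths : List Nat) : List (List Char) :=
  bases.zipIdx.map (fun p => PySem.List.slice p.1 (some (-(lengths.getD p.2 0 : Int))) none)

-- counts = {}; for c in codes: counts[c] = counts.get(c, 0) + 1
def pvCounts (codes : List (List Char)) : PySem.Dict (List Char) Int :=
  codes.foldl (fun d c => d.insert c (d.getD c 0 + 1)) PySem.Dict.empty

-- duplicates = {idx for idx, c in enumerate(codes) if counts[c] > 1}   (counts[c]: key always present, rendered with getD — exact here)
def pvDups (codes : List (List Char)) : PySem.Set Nat :=
  PySem.Set.ofList (codes.zipIdx.filterMap (fun p => if 1 < (pvCounts codes).getD p.1 0 then some p.2 else none))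

-- for idx in duplicates: if lengths[idx] < len(bases[idx]): lengths[idx] += 1; progressed = True
-- (a set comprehension of distinct indices; the updates are order-independent)
def pvUpdate (bases : List (List Char)) (dups : List Nat) (lengths : List Nat) : List Nat × Bool :=
  dups.foldl (fun st idx =>
    if st.1.getD idx 0 < (bases.getD idx []).length
    then (PySem.List.pySetD st.1 (idx : Int) (st.1.getD idx 0 + 1), true)
    else st) (lengths, false)

-- the while-True loop; fuel is a totality guard only (each progressing pass increases the
-- total of `lengths`, which is bounded by the total base length, so the fuel used never runs out)
def pvLoopA (bases : List (List Char)) : Nat → List Nat → List Nat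
  | 0, lengths => lengths
  | fuel+1, lengths =>
    let codes := pvRoundCodes bases lengths
    let dups := pvDups codes
    if dups.isEmpty then lengths
    else
      let st := pvUpdate bases dups lengths
      if st.2 then pvLoopA bases fuel st.1 else st.1

def build_short_code_summary_py (calls : List String) : String :=
  let bases := pvBases calls
  let lengths0 := bases.map (fun b => if b.length < 3 then min 3 b.length else 3)
  let lengths := pvLoopA bases ((bases.map List.length).sum + 1) lengths0
  String.ofList (PySem.Chars.join [' ']
    ((List.range bases.length).map (fun i =>
      PySem.List.slice (bases.getD i []) (some (-(lengths.getD i 0 : Int))) none)))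

-- ===== PORT B =====
-- k = 0; for a, b in zip(reversed(x), reversed(y)): if a != b: break; k += 1
def pvCommonSuffixLen (x y : List Char) : Nat :=
  ((x.reverse.zip y.reverse).takeWhile (fun p => p.1 == p.2)).length

-- groups.setdefault(b[-3:], []).append(j) for bases of length >= 3
def pvGroups (bases : List (List Char)) : PySem.Dict (List Char) (List Nat) :=
  bases.zipIdx.foldl (fun d p =>
      if 3 ≤ p.1.length then d.modify (PySem.List.slice p.1 (some (-3)) none) [] (· ++ [p.2]) else d)
    PySem.Dict.empty

-- the closed-form length chosen for base b at position i
def pvAltLen (bases : List (List Char)) (groups : PySem.Dict (List Char) (List Nat)) (b : List Char) (i : Nat) : Nat :=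
  if b.length < 3 then b.length
  else
    let m := (groups.getD (PySem.List.slice b (some (-3)) none) []).foldl (fun m j =>
        if j ≠ i then
          let k := pvCommonSuffixLen b (bases.getD j [])
          if m < k then k else m
        else m) 0
    min b.length (max 3 (m + 1))

def build_short_code_summary_py_alt (calls : List String) : String :=
  let bases := pvBases calls
  let groups := pvGroups bases
  let outs := bases.zipIdx.map (fun p =>
      PySem.List.slice p.1 (some (-(pvAltLen bases groups p.1 p.2 : Int))) none)
  String.ofList (PySem.Chars.join [' '] outs)

-- ===== PRECONDITION & SPEC =====
def Spec_build_short_code_summary_py (calls : List String) (out : String) : Prop := out = build_short_code_summary_py_alt calls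
instance (calls : List String) (out : String) : Decidable (Spec_build_short_code_summary_py calls out) := by unfold Spec_build_short_code_summary_py; infer_instance

-- ===== CLAIM (what is proved, stated in full; the proofs are below) =====
def Claim_equal_build_short_code_summary_py : Prop := ∀ (calls : List String), Dom_build_short_code_summary_py calls → Spec_build_short_code_summary_py calls (build_short_code_summary_py calls)

-- ===== LEMMAS AND PROOFS =====

-- common-prefix length of two lists (pvCommonSuffixLen works on the reversed lists)
def pvCp (x y : List Char) : Nat := ((x.zip y).takeWhile (fun p => p.1 == p.2)).length

theorem pvCp_le_right (x y : List Char) : pvCp x y ≤ y.length := by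
  calc ((x.zip y).takeWhile _).length ≤ (x.zip y).length := (List.takeWhile_sublist _).length_le
    _ ≤ y.length := by simp [List.length_zip]

theorem pvCp_comm (x y : List Char) : pvCp x y = pvCp y x := by
  induction x generalizing y with
  | nil => cases y <;> simp [pvCp]
  | cons a x ih =>
    cases y with
    | nil => simp [pvCp]
    | cons b y =>
      simp only [pvCp, List.zip_cons_cons, List.takeWhile]
      by_cases h : a = b
      · subst h; simp only [beq_self_eq_true]; simpa [pvCp] using congrArg Nat.succ (ih y)
      · have h1 : (a == b) = false := by simpa using h
        have h2 : (b == a) = false := by simpa using Ne.symm h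
        simp [h1, h2]

theorem pvCp_self (x : List Char) : pvCp x x = x.length := by
  induction x with
  | nil => simp [pvCp]
  | cons a x ih => simpa [pvCp, List.takeWhile] using congrArg Nat.succ ih

theorem pvTake_eq_iff (x y : List Char) (l : Nat) :
    x.take l = y.take l ↔ (l ≤ pvCp x y ∨ x = y) := by
  induction x generalizing y l with
  | nil =>
    cases y with
    | nil => simp [pvCp]
    | cons b y =>
      simp only [List.take_nil, pvCp, List.zip_nil_left, List.takeWhile_nil, List.length_nil]
      constructor
      · intro h; have := congrArg List.length h; simp at this; omega
      · rintro (h | h); · simp [List.take_of_length_le, Nat.le_zero.mp h]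
        · exact absurd h (by simp)
  | cons a x ih =>
    cases y with
    | nil =>
      simp only [List.take_nil, pvCp, List.zip_nil_right, List.takeWhile_nil, List.length_nil]
      constructor
      · intro h; have := congrArg List.length h; simp at this; omega
      · rintro (h | h); · simp [List.take_of_length_le, Nat.le_zero.mp h]
        · exact absurd h (by simp)
    | cons b y =>
      cases l with
      | zero => simp [pvCp]
      | succ k =>
        simp only [List.take_succ_cons, List.cons.injEq]
        by_cases h : a = b
        · subst h
          have : pvCp (a :: x) (a :: y) = pvCp x y + 1 := by
            simp [pvCp, List.takeWhile]
          rw [ih y k, this]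
          constructor
          · rintro ⟨_, h2 | h2⟩
            · left; omega
            · right; simp [h2]
          · rintro (h2 | h2)
            · exact ⟨rfl, Or.inl (by omega)⟩
            · exact ⟨rfl, Or.inr (by simpa using h2)⟩
        · have : pvCp (a :: x) (b :: y) = 0 := by
            simp [pvCp, List.takeWhile, h]
          rw [this]
          constructor
          · rintro ⟨hab, -⟩; exact absurd hab h
          · rintro (h2 | h2); · omega
            · exact absurd h2.1 h

-- the (reversed) code of base b at working length l: b[-l:]
def pvCode (b : List Char) (l : Nat) : List Char := (b.reverse.take l).reverse

theorem pvSlice_eq_code (b : List Char) (l : Nat) (h : 1 ≤ l ∨ b = []) :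
    PySem.List.slice b (some (-(l : Int))) none = pvCode b l := by
  by_cases hl : 1 ≤ l
  · rw [PySem.List.slice_from_neg_natCast b l (by omega)]
    unfold pvCode
    conv_lhs => rw [← List.reverse_reverse (List.drop (b.length - l) b)]
    rw [List.reverse_drop]
    rcases Nat.lt_or_ge b.length l with h1 | h1
    · rw [List.take_of_length_le (by simp; omega), List.take_of_length_le (by simp; omega)]
    · congr 2; omega
  · have hl0 : l = 0 := by omega
    subst hl0
    rcases h with h | rfl
    · omega
    · simp [pvCode, PySem.List.slice_none_none]

-- the closed-form final length of base i
def pvMax (bases : List (List Char)) (i : Nat) : Nat :=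
  ((Finset.range bases.length).erase i).sup
    (fun j => pvCp (bases.getD i []).reverse (bases.getD j []).reverse)

def pvLen (bases : List (List Char)) (i : Nat) : Nat :=
  min (bases.getD i []).length (max 3 (pvMax bases i + 1))

def pvLenList (bases : List (List Char)) : List Nat :=
  (List.range bases.length).map (pvLen bases)

-- i is (still) colliding in state ls
def pvDup (bases : List (List Char)) (ls : List Nat) (i : Nat) : Prop :=
  ∃ j, j < bases.length ∧ j ≠ i ∧
    pvCode (bases.getD j []) (ls.getD j 0) = pvCode (bases.getD i []) (ls.getD i 0)

-- the length of a code
theorem pvCode_length (b : List Char) (l : Nat) : (pvCode b l).length = min l b.length := by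
  simp [pvCode]

-- S1: an unfinished index is a colliding one
theorem pvStep_dup (bases : List (List Char)) (ls : List Nat) (c : Nat) (hc : 3 ≤ c)
    (hinv : ∀ i, i < bases.length → ls.getD i 0 = min (pvLen bases i) c)
    (i : Nat) (hi : i < bases.length) (hlt : c < pvLen bases i) :
    pvDup bases ls i := by
  have hM : c ≤ pvMax bases i := by
    have := hlt; unfold pvLen at this; omega
  obtain ⟨j, hjmem, hjle⟩ := (Finset.le_sup_iff (Nat.bot_eq_zero ▸ (by omega : 0 < c))).mp hM
  obtain ⟨hjne, hjrange⟩ := Finset.mem_erase.mp hjmem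
  have hjn : j < bases.length := Finset.mem_range.mp hjrange
  have hbj : c ≤ (bases.getD j []).length := by
    have := le_trans hjle (pvCp_le_right _ _)
    simpa using this
  have hMj : c ≤ pvMax bases j := by
    refine le_trans ?_ (Finset.le_sup (f := fun k => pvCp (bases.getD j []).reverse (bases.getD k []).reverse)
      (Finset.mem_erase.mpr ⟨Ne.symm hjne, Finset.mem_range.mpr hi⟩))
    show c ≤ pvCp (bases.getD j []).reverse (bases.getD i []).reverse
    rw [pvCp_comm]; exact hjle
  refine ⟨j, hjn, hjne, ?_⟩
  rw [hinv j hjn, hinv i hi]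
  have h1 : min (pvLen bases j) c = c := by unfold pvLen; omega
  have h2 : min (pvLen bases i) c = c := by omega
  rw [h1, h2]
  unfold pvCode
  congr 1
  rw [pvTake_eq_iff]
  left
  rw [pvCp_comm]
  exact hjle

-- S2: a colliding index that is already finished is at full base length
theorem pvStep_done (bases : List (List Char)) (ls : List Nat) (c : Nat) (hc : 3 ≤ c)
    (hinv : ∀ i, i < bases.length → ls.getD i 0 = min (pvLen bases i) c)
    (i : Nat) (hi : i < bases.length) (hle : pvLen bases i ≤ c)
    (hdup : pvDup bases ls i) : pvLen bases i = (bases.getD i []).length := by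
  by_contra hne
  have hlt : pvLen bases i < (bases.getD i []).length := by
    have : pvLen bases i ≤ (bases.getD i []).length := min_le_left _ _
    omega
  have hlM : pvMax bases i < pvLen bases i := by unfold pvLen at hlt ⊢; omega
  have hl3 : 3 ≤ pvLen bases i := by unfold pvLen at hlt ⊢; omega
  obtain ⟨j, hjn, hjne, hcode⟩ := hdup
  rw [hinv j hjn, hinv i hi, min_eq_left hle] at hcode
  set l := pvLen bases i with hldef
  set lj := min (pvLen bases j) c with hljdef
  have hlenj : min lj (bases.getD j []).length = l := by
    have := congrArg List.length hcode
    rw [pvCode_length, pvCode_length] at this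
    omega
  have htake0 : (bases.getD j []).reverse.take lj = (bases.getD i []).reverse.take l := by
    have := congrArg List.reverse hcode
    simpa [pvCode] using this
  have htake : (bases.getD j []).reverse.take l = (bases.getD i []).reverse.take l := by
    rcases Nat.lt_or_ge lj ((bases.getD j []).length + 1) with h1 | h1
    · have hle2 : lj = l := by omega
      rw [hle2] at htake0; exact htake0
    · have e1 : (bases.getD j []).reverse.take lj = (bases.getD j []).reverse := List.take_of_length_le (by rw [List.length_reverse]; omega)
      have e2 : (bases.getD j []).reverse.take l = (bases.getD j []).reverse := List.take_of_length_le (by rw [List.length_reverse]; omega)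
      rw [e2, ← e1]; exact htake0
  have := (pvTake_eq_iff _ _ l).mp htake
  rcases this with h1 | h1
  · have : pvCp (bases.getD i []).reverse (bases.getD j []).reverse ≤ pvMax bases i := by
      unfold pvMax
      exact Finset.le_sup (f := fun k => pvCp (bases.getD i []).reverse (bases.getD k []).reverse)
        (Finset.mem_erase.mpr ⟨hjne, Finset.mem_range.mpr hjn⟩)
    rw [pvCp_comm] at h1
    omega
  · have hself : pvCp (bases.getD i []).reverse (bases.getD j []).reverse = (bases.getD i []).length := by
      rw [h1, pvCp_self, List.length_reverse]
    have : pvCp (bases.getD i []).reverse (bases.getD j []).reverse ≤ pvMax bases i := by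
      unfold pvMax
      exact Finset.le_sup (f := fun k => pvCp (bases.getD i []).reverse (bases.getD k []).reverse)
        (Finset.mem_erase.mpr ⟨hjne, Finset.mem_range.mpr hjn⟩)
    omega

-- counting: a list element occurs twice iff another position holds the same value
theorem pvCount_two_iff (xs : List (List Char)) (i : Nat) (hi : i < xs.length) :
    1 < xs.count (xs.getD i []) ↔ ∃ j, j < xs.length ∧ j ≠ i ∧ xs.getD j [] = xs.getD i [] := by
  set c := xs.getD i [] with hc
  have hxs : xs = xs.take i ++ c :: xs.drop (i + 1) := by
    rw [hc, List.getD_eq_getElem _ _ hi]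
    conv_lhs => rw [← List.take_append_drop i xs]
    rw [List.drop_eq_getElem_cons hi]
  have hcount : xs.count c = (xs.take i).count c + (1 + (xs.drop (i+1)).count c) := by
    conv_lhs => rw [hxs]
    rw [List.count_append, List.count_cons]
    simp; omega
  constructor
  · intro h
    have : 0 < (xs.take i).count c ∨ 0 < (xs.drop (i+1)).count c := by omega
    rcases this with h1 | h1
    · rw [List.count_pos_iff] at h1
      obtain ⟨k, hk, hkc⟩ := List.mem_iff_getElem.mp h1
      have hki : k < i := by have := hk; simp [List.length_take] at this; omega
      refine ⟨k, by omega, by omega, ?_⟩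
      rw [List.getD_eq_getElem _ _ (by omega)]
      rw [List.getElem_take] at hkc
      exact hkc
    · rw [List.count_pos_iff] at h1
      obtain ⟨k, hk, hkc⟩ := List.mem_iff_getElem.mp h1
      have hklen : i + 1 + k < xs.length := by simp [List.length_drop] at hk; omega
      refine ⟨i + 1 + k, hklen, by omega, ?_⟩
      rw [List.getD_eq_getElem _ _ hklen]
      rw [List.getElem_drop] at hkc
      exact hkc
  · rintro ⟨j, hj, hji, hjc⟩
    rcases Nat.lt_or_ge j i with h1 | h1
    · have : c ∈ xs.take i := by
        rw [List.mem_iff_getElem]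
        refine ⟨j, by simp [List.length_take]; omega, ?_⟩
        rw [List.getElem_take]
        rw [List.getD_eq_getElem _ _ hj] at hjc; exact hjc
      rw [← List.count_pos_iff] at this; omega
    · have h2 : i < j := by omega
      have : c ∈ xs.drop (i+1) := by
        rw [List.mem_iff_getElem]
        refine ⟨j - (i+1), by simp [List.length_drop]; omega, ?_⟩
        rw [List.getElem_drop]
        have : i + 1 + (j - (i+1)) = j := by omega
        simp_rw [this]
        rw [List.getD_eq_getElem _ _ hj] at hjc; exact hjc
      rw [← List.count_pos_iff] at this; omega

-- the codes list, pointwise, and the duplicates set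
theorem pvRoundCodes_getD (bases : List (List Char)) (ls : List Nat) (i : Nat) (hi : i < bases.length) :
    (pvRoundCodes bases ls).getD i [] = PySem.List.slice (bases.getD i []) (some (-(ls.getD i 0 : Int))) none := by
  have hlen : i < (pvRoundCodes bases ls).length := by simp [pvRoundCodes, hi]
  rw [List.getD_eq_getElem _ _ hlen, List.getD_eq_getElem _ _ hi]
  simp [pvRoundCodes]

theorem pvCounts_getD (codes : List (List Char)) (c : List Char) :
    (pvCounts codes).getD c 0 = (codes.count c : Int) := by
  have : pvCounts codes = PySem.Dict.counter codes := rfl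
  rw [this, PySem.Dict.getD_counter]

theorem pvDups_mem (codes : List (List Char)) (i : Nat) :
    i ∈ pvDups codes ↔ i < codes.length ∧ 1 < codes.count (codes.getD i []) := by
  unfold pvDups
  rw [PySem.Set.mem_ofList, List.mem_filterMap]
  constructor
  · rintro ⟨⟨c, j⟩, hmem, hif⟩
    rw [List.mem_zipIdx_iff_getElem?] at hmem
    have hj : j < codes.length := by
      by_contra hge
      rw [List.getElem?_eq_none (by omega)] at hmem; simp at hmem
    have hc : codes[j] = c := by
      rw [List.getElem?_eq_getElem hj] at hmem; exact Option.some.inj hmem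
    by_cases hcond : 1 < (pvCounts codes).getD c 0
    · simp only [hcond, if_pos] at hif
      have hij : j = i := Option.some.inj hif
      subst hij; subst hc
      refine ⟨hj, ?_⟩
      have := pvCounts_getD codes codes[j]
      rw [List.getD_eq_getElem _ _ hj]
      rw [pvCounts_getD] at hcond
      exact_mod_cast hcond
    · simp only [hcond, if_false] at hif
      simp at hif
  · rintro ⟨hi, hcount⟩
    refine ⟨(codes.getD i [], i), ?_, ?_⟩
    · rw [List.mem_zipIdx_iff_getElem?]
      simp [List.getD_eq_getElem _ _ hi, List.getElem?_eq_getElem hi]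
    · have : 1 < (pvCounts codes).getD (codes.getD i []) 0 := by
        rw [pvCounts_getD]; exact_mod_cast hcount
      simp only [this, if_pos]

theorem pvRoundCodes_length (bases : List (List Char)) (ls : List Nat) :
    (pvRoundCodes bases ls).length = bases.length := by
  simp [pvRoundCodes]

theorem pvDups_nodup (codes : List (List Char)) : (pvDups codes).Nodup :=
  PySem.Set.nodup_ofList _

-- the update fold, pointwise
theorem pvSetD_nat (ls : List Nat) (j : Nat) (hj : j < ls.length) (v : Nat) :
    PySem.List.pySetD ls (j : Int) v = ls.set j v := by
  unfold PySem.List.pySetD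
  rw [PySem.List.pySet?_natCast _ _ _ hj]
  rfl

theorem pvUpdate_aux (bases : List (List Char)) (S : List Nat) (hS : ∀ j ∈ S, j < bases.length)
    (hnd : S.Nodup) :
    ∀ ls (p : Bool), ls.length = bases.length →
    (S.foldl (fun st idx =>
      if st.1.getD idx 0 < (bases.getD idx []).length
      then (PySem.List.pySetD st.1 (idx : Int) (st.1.getD idx 0 + 1), true)
      else st) (ls, p)).1.length = ls.length ∧
    (∀ k, (S.foldl (fun st idx =>
      if st.1.getD idx 0 < (bases.getD idx []).length
      then (PySem.List.pySetD st.1 (idx : Int) (st.1.getD idx 0 + 1), true)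
      else st) (ls, p)).1.getD k 0 =
      if k ∈ S ∧ ls.getD k 0 < (bases.getD k []).length then ls.getD k 0 + 1 else ls.getD k 0) ∧
    ((S.foldl (fun st idx =>
      if st.1.getD idx 0 < (bases.getD idx []).length
      then (PySem.List.pySetD st.1 (idx : Int) (st.1.getD idx 0 + 1), true)
      else st) (ls, p)).2 = (p || S.any (fun j => decide (ls.getD j 0 < (bases.getD j []).length)))) := by
  induction S with
  | nil => intro ls p hlen; simp
  | cons a S ih =>
    intro ls p hlen
    have ha : a < bases.length := hS a (by simp)
    have haS : a ∉ S := (List.nodup_cons.mp hnd).1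
    have hndS : S.Nodup := (List.nodup_cons.mp hnd).2
    have hSS : ∀ j ∈ S, j < bases.length := fun j hj => hS j (by simp [hj])
    rw [List.foldl_cons]
    by_cases hcond : ls.getD a 0 < (bases.getD a []).length
    · simp only [hcond, if_pos, if_true]
      have halen : a < ls.length := by omega
      rw [pvSetD_nat ls a halen]
      set ls' := ls.set a (ls.getD a 0 + 1) with hls'
      have hlen' : ls'.length = bases.length := by simp [hls', hlen]
      obtain ⟨ih1, ih2, ih3⟩ := ih hSS hndS ls' true hlen'
      have hgetD : ∀ k, ls'.getD k 0 = if k = a then ls.getD a 0 + 1 else ls.getD k 0 := by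
        intro k
        rw [hls']
        rw [List.getD_eq_getElem?_getD, List.getD_eq_getElem?_getD, List.getElem?_set]
        by_cases hka : a = k
        · subst hka; simp [halen, List.getD_eq_getElem?_getD]
        · simp [hka, Ne.symm hka]
      refine ⟨by rw [ih1]; simp [hls'], ?_, ?_⟩
      · intro k
        rw [ih2 k]
        by_cases hk : k = a
        · rw [hk, if_neg (fun h => haS h.1), if_pos ⟨List.mem_cons_self, hcond⟩, hgetD a, if_pos rfl]
        · rw [hgetD k, if_neg hk]
          by_cases hkS : k ∈ S
          · have hmem : k ∈ a::S := by simp [hkS]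
            by_cases hlt : ls.getD k 0 < (bases.getD k []).length
            · rw [if_pos ⟨hkS, hlt⟩, if_pos ⟨hmem, hlt⟩]
            · rw [if_neg (fun h => hlt h.2), if_neg (fun h => hlt h.2)]
          · have hmem : k ∉ a::S := by simp [hkS, hk]
            rw [if_neg (fun h => hkS h.1), if_neg (fun h => hmem h.1)]
      · rw [ih3]
        have hc2 : ls[a]?.getD 0 < (bases[a]?.getD []).length := by
          simpa [List.getD_eq_getElem?_getD] using hcond
        simp [hc2]
    · simp only [hcond, if_false]
      obtain ⟨ih1, ih2, ih3⟩ := ih hSS hndS ls p hlen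
      refine ⟨ih1, ?_, ?_⟩
      · intro k
        rw [ih2 k]
        by_cases hk : k = a
        · rw [hk, if_neg (fun h => haS h.1), if_neg (fun h => hcond h.2)]
        · by_cases hkS : k ∈ S
          · have hmem : k ∈ a::S := by simp [hkS]
            by_cases hlt : ls.getD k 0 < (bases.getD k []).length
            · rw [if_pos ⟨hkS, hlt⟩, if_pos ⟨hmem, hlt⟩]
            · rw [if_neg (fun h => hlt h.2), if_neg (fun h => hlt h.2)]
          · have hmem : k ∉ a::S := by simp [hkS, hk]
            rw [if_neg (fun h => hkS h.1), if_neg (fun h => hmem h.1)]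
      · rw [ih3]
        have hc2 : ¬ ls[a]?.getD 0 < (bases[a]?.getD []).length := by
          simpa [List.getD_eq_getElem?_getD] using hcond
        simp [hc2]

-- the same, stated on pvUpdate
theorem pvUpdate_spec (bases : List (List Char)) (S : List Nat) (hS : ∀ j ∈ S, j < bases.length)
    (hnd : S.Nodup) (ls : List Nat) (hlen : ls.length = bases.length) :
    (pvUpdate bases S ls).1.length = ls.length ∧
    (∀ k, (pvUpdate bases S ls).1.getD k 0 =
      if k ∈ S ∧ ls.getD k 0 < (bases.getD k []).length then ls.getD k 0 + 1 else ls.getD k 0) ∧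
    ((pvUpdate bases S ls).2 = (false || S.any (fun j => decide (ls.getD j 0 < (bases.getD j []).length)))) := by
  unfold pvUpdate
  exact pvUpdate_aux bases S hS hnd ls false hlen

-- two lists of naturals agreeing under getD are equal
theorem pvListEq (xs ys : List Nat) (hlen : xs.length = ys.length)
    (h : ∀ k, xs.getD k 0 = ys.getD k 0) : xs = ys := by
  refine List.ext_getElem hlen ?_
  intro i h1 h2
  have := h i
  rw [List.getD_eq_getElem _ _ h1, List.getD_eq_getElem _ _ h2] at this
  exact this

theorem pvLenList_length (bases : List (List Char)) : (pvLenList bases).length = bases.length := by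
  simp [pvLenList]

theorem pvLenList_getD (bases : List (List Char)) (i : Nat) (hi : i < bases.length) :
    (pvLenList bases).getD i 0 = pvLen bases i :=
  PySem.List.getD_map_range _ _ _ _ hi

theorem pvEqLenList (bases : List (List Char)) (ls : List Nat) (hlen : ls.length = bases.length)
    (h : ∀ i, i < bases.length → ls.getD i 0 = pvLen bases i) : ls = pvLenList bases := by
  refine List.ext_getElem (by rw [hlen, pvLenList_length]) ?_
  intro i h1 h2
  have hi : i < bases.length := by omega
  have := h i hi
  rw [List.getD_eq_getElem _ _ h1] at this
  rw [this, ← pvLenList_getD bases i hi, List.getD_eq_getElem _ _ h2]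

-- the working length of any index is positive unless its base is empty
theorem pvState_pos (bases : List (List Char)) (c : Nat) (hc : 3 ≤ c) (i : Nat) :
    1 ≤ min (pvLen bases i) c ∨ bases.getD i [] = [] := by
  by_cases hb : bases.getD i [] = []
  · right; exact hb
  · left
    have : 1 ≤ (bases.getD i []).length := by
      cases h : bases.getD i [] with
      | nil => exact absurd h hb
      | cons a t => simp [h]
    unfold pvLen; omega

-- the main loop invariant: from state min(pvLen, c) the loop ends in pvLenList
theorem pvLoopA_inv (bases : List (List Char)) (fuel c : Nat) (ls : List Nat) (hc : 3 ≤ c)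
    (hlen : ls.length = bases.length)
    (hinv : ∀ i, i < bases.length → ls.getD i 0 = min (pvLen bases i) c)
    (hfuel : ∀ i, i < bases.length → pvLen bases i ≤ c + fuel) :
    pvLoopA bases fuel ls = pvLenList bases := by
  induction fuel generalizing c ls with
  | zero =>
    show ls = pvLenList bases
    refine pvEqLenList bases ls hlen ?_
    intro i hi
    have h1 := hfuel i hi
    rw [hinv i hi]
    omega
  | succ fuel ih =>
    have hcode_getD : ∀ i, i < bases.length →
        (pvRoundCodes bases ls).getD i [] = pvCode (bases.getD i []) (ls.getD i 0) := by
      intro i hi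
      rw [pvRoundCodes_getD bases ls i hi]
      refine pvSlice_eq_code _ _ ?_
      rw [hinv i hi]
      exact pvState_pos bases c hc i
    have hclen : (pvRoundCodes bases ls).length = bases.length := pvRoundCodes_length bases ls
    have hdup_iff : ∀ i, i < bases.length → (i ∈ pvDups (pvRoundCodes bases ls) ↔ pvDup bases ls i) := by
      intro i hi
      rw [pvDups_mem, pvCount_two_iff _ i (by omega)]
      unfold pvDup
      constructor
      · rintro ⟨-, j, hj, hji, hjc⟩
        refine ⟨j, by omega, hji, ?_⟩
        rw [hcode_getD j (by omega), hcode_getD i hi] at hjc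
        exact hjc
      · rintro ⟨j, hj, hji, hjc⟩
        refine ⟨by omega, j, by omega, hji, ?_⟩
        rw [hcode_getD j hj, hcode_getD i hi]
        exact hjc
    have hSub : ∀ j ∈ pvDups (pvRoundCodes bases ls), j < bases.length := by
      intro j hj
      have := ((pvDups_mem _ j).mp hj).1
      omega
    obtain ⟨hu1, hu2, hu3⟩ := pvUpdate_spec bases (pvDups (pvRoundCodes bases ls)) hSub
      (pvDups_nodup _) ls hlen
    rw [Bool.false_or] at hu3
    by_cases hex : ∃ i, i < bases.length ∧ c < pvLen bases i
    · obtain ⟨i0, hi0, hlt0⟩ := hex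
      have hdup0 : pvDup bases ls i0 := pvStep_dup bases ls c hc hinv i0 hi0 hlt0
      have hmem0 : i0 ∈ pvDups (pvRoundCodes bases ls) := (hdup_iff i0 hi0).mpr hdup0
      have hne : (pvDups (pvRoundCodes bases ls)).isEmpty = false := by
        cases h : pvDups (pvRoundCodes bases ls) with
        | nil => rw [h] at hmem0; exact absurd hmem0 List.not_mem_nil
        | cons a t => rfl
      have hcond0 : ls.getD i0 0 < (bases.getD i0 []).length := by
        rw [hinv i0 hi0]
        have : pvLen bases i0 ≤ (bases.getD i0 []).length := min_le_left _ _
        omega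
      have hprog : (pvUpdate bases (pvDups (pvRoundCodes bases ls)) ls).2 = true := by
        rw [hu3, List.any_eq_true]
        exact ⟨i0, hmem0, by simpa using hcond0⟩
      have hstep : pvLoopA bases (fuel + 1) ls
          = pvLoopA bases fuel (pvUpdate bases (pvDups (pvRoundCodes bases ls)) ls).1 := by
        show (if (pvDups (pvRoundCodes bases ls)).isEmpty then ls
          else if (pvUpdate bases (pvDups (pvRoundCodes bases ls)) ls).2
            then pvLoopA bases fuel (pvUpdate bases (pvDups (pvRoundCodes bases ls)) ls).1
            else (pvUpdate bases (pvDups (pvRoundCodes bases ls)) ls).1) = _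
        rw [hne, hprog]
        simp
      rw [hstep]
      refine ih (c+1) _ (by omega) (by rw [hu1, hlen]) ?_ ?_
      · intro k hk
        rw [hu2 k]
        by_cases hcondk : k ∈ pvDups (pvRoundCodes bases ls) ∧ ls.getD k 0 < (bases.getD k []).length
        · rw [if_pos hcondk]
          have hdupk : pvDup bases ls k := (hdup_iff k hk).mp hcondk.1
          rcases Nat.lt_or_ge c (pvLen bases k) with h1 | h1
          · rw [hinv k hk]; omega
          · have := pvStep_done bases ls c hc hinv k hk h1 hdupk
            have h2 := hinv k hk
            have h3 := hcondk.2
            omega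
        · rw [if_neg hcondk]
          rw [hinv k hk]
          rcases Nat.lt_or_ge c (pvLen bases k) with h1 | h1
          · exfalso
            apply hcondk
            have hdupk : pvDup bases ls k := pvStep_dup bases ls c hc hinv k hk h1
            refine ⟨(hdup_iff k hk).mpr hdupk, ?_⟩
            rw [hinv k hk]
            have : pvLen bases k ≤ (bases.getD k []).length := min_le_left _ _
            omega
          · omega
      · intro i hi
        have := hfuel i hi
        omega
    · push_neg at hex
      have hdone : ∀ i, i < bases.length → ls.getD i 0 = pvLen bases i := by
        intro i hi
        rw [hinv i hi]
        have := hex i hi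
        omega
      have hfinal : ls = pvLenList bases := pvEqLenList bases ls hlen hdone
      have hnoext : ∀ j ∈ pvDups (pvRoundCodes bases ls), ¬ ls.getD j 0 < (bases.getD j []).length := by
        intro j hj
        have hjn : j < bases.length := hSub j hj
        have hdupj : pvDup bases ls j := (hdup_iff j hjn).mp hj
        have := pvStep_done bases ls c hc hinv j hjn (hex j hjn) hdupj
        rw [hdone j hjn]
        omega
      by_cases hemp : (pvDups (pvRoundCodes bases ls)).isEmpty
      · show (if (pvDups (pvRoundCodes bases ls)).isEmpty then ls
          else if (pvUpdate bases (pvDups (pvRoundCodes bases ls)) ls).2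
            then pvLoopA bases fuel (pvUpdate bases (pvDups (pvRoundCodes bases ls)) ls).1
            else (pvUpdate bases (pvDups (pvRoundCodes bases ls)) ls).1) = _
        rw [hemp]
        simpa using hfinal
      · have hempf : (pvDups (pvRoundCodes bases ls)).isEmpty = false := by
          simpa using hemp
        have hprog : (pvUpdate bases (pvDups (pvRoundCodes bases ls)) ls).2 = false := by
          rw [hu3, List.any_eq_false]
          intro j hj
          simpa using hnoext j hj
        have hsame : (pvUpdate bases (pvDups (pvRoundCodes bases ls)) ls).1 = ls := by
          refine pvListEq _ _ hu1 ?_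
          intro k
          rw [hu2 k]
          exact if_neg (fun h => hnoext k h.1 h.2)
        show (if (pvDups (pvRoundCodes bases ls)).isEmpty then ls
          else if (pvUpdate bases (pvDups (pvRoundCodes bases ls)) ls).2
            then pvLoopA bases fuel (pvUpdate bases (pvDups (pvRoundCodes bases ls)) ls).1
            else (pvUpdate bases (pvDups (pvRoundCodes bases ls)) ls).1) = _
        rw [hempf, hprog]
        simpa using hsame.trans hfinal

-- the initial lengths are min(pvLen, 3)
theorem pvInit_getD (bases : List (List Char)) (i : Nat) (hi : i < bases.length) :
    (bases.map (fun b => if b.length < 3 then min 3 b.length else 3)).getD i 0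
      = min (pvLen bases i) 3 := by
  have h1 : i < (bases.map (fun b => if b.length < 3 then min 3 b.length else 3)).length := by
    simpa using hi
  rw [List.getD_eq_getElem _ _ h1, List.getElem_map, ← List.getD_eq_getElem bases [] hi]
  unfold pvLen
  split_ifs <;> omega

-- every closed-form length is bounded by the total base length
theorem pvLen_le_sum (bases : List (List Char)) (i : Nat) (hi : i < bases.length) :
    pvLen bases i ≤ (bases.map List.length).sum := by
  have hmem : (bases.getD i []).length ∈ bases.map List.length := by
    rw [List.getD_eq_getElem bases [] hi]
    exact List.mem_map_of_mem (bases.getElem_mem hi)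
  have := List.single_le_sum (l := bases.map List.length) (fun x _ => Nat.zero_le x) _ hmem
  have h2 : pvLen bases i ≤ (bases.getD i []).length := min_le_left _ _
  omega

-- A's loop, run from its true entry state, ends in the closed-form lengths
theorem pvLoopA_final (bases : List (List Char)) :
    pvLoopA bases ((bases.map List.length).sum + 1)
      (bases.map (fun b => if b.length < 3 then min 3 b.length else 3)) = pvLenList bases := by
  refine pvLoopA_inv bases _ 3 _ (le_refl 3) (by simp) ?_ ?_
  · exact fun i hi => pvInit_getD bases i hi
  · intro i hi
    have := pvLen_le_sum bases i hi
    omega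

-- a fold guarded by a filter condition is the fold of the filtered list
theorem pvFoldlIf {α β : Type} (P : α → Prop) [DecidablePred P] (f : β → α → β) :
    ∀ (l : List α) (d : β),
      l.foldl (fun d x => if P x then f d x else d) d
        = (l.filter (fun x => decide (P x))).foldl f d := by
  intro l
  induction l with
  | nil => intro d; simp
  | cons a l ih =>
    intro d
    by_cases h : P a <;> simp [h, ih]

-- membership in a last-3-suffix group
theorem pvGroups_mem (bases : List (List Char)) (c : List Char) (j : Nat) :
    j ∈ (pvGroups bases).getD c []
      ↔ j < bases.length ∧ 3 ≤ (bases.getD j []).length ∧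
          PySem.List.slice (bases.getD j []) (some (-3)) none = c := by
  unfold pvGroups
  rw [pvFoldlIf (fun (p : List Char × Nat) => 3 ≤ p.1.length)]
  have hmap : (bases.zipIdx.filter (fun p => decide (3 ≤ p.1.length))).foldl
        (fun d p => d.modify (PySem.List.slice p.1 (some (-3)) none) [] (· ++ [p.2])) PySem.Dict.empty
      = ((bases.zipIdx.filter (fun p => decide (3 ≤ p.1.length))).map
          (fun p => (PySem.List.slice p.1 (some (-3)) none, p.2))).foldl
        (fun d q => d.modify q.1 [] (· ++ [q.2])) PySem.Dict.empty := by
    rw [List.foldl_map]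
  rw [hmap, PySem.Dict.getD_foldl_modify_append]
  simp only [PySem.Dict.getD_empty, List.nil_append, List.mem_map, List.mem_filter,
    List.mem_zipIdx_iff_getElem?, List.filter_map, List.mem_filter]
  constructor
  · intro h
    obtain ⟨a, ⟨⟨b, j2⟩, ⟨⟨hget, hlen3⟩, hkey⟩, hpair⟩, hj2⟩ := h
    have hj2j : j2 = j := by rw [← hpair] at hj2; simpa using hj2
    subst hj2j
    have hj : j2 < bases.length := by
      by_contra hge
      rw [List.getElem?_eq_none (by omega)] at hget
      simp at hget
    have hbD : bases.getD j2 [] = b := by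
      rw [List.getD_eq_getElem bases [] hj]
      rw [List.getElem?_eq_getElem hj] at hget
      exact Option.some.inj hget
    refine ⟨hj, ?_, ?_⟩
    · rw [hbD]; simpa using hlen3
    · rw [hbD]
      have : (PySem.List.slice b (some (-3)) none == c) = true := by simpa using hkey
      exact eq_of_beq this
  · rintro ⟨hj, hlen3, hkey⟩
    refine ⟨(PySem.List.slice (bases.getD j []) (some (-3)) none, j),
      ⟨(bases.getD j [], j), ⟨⟨?_, by simpa using hlen3⟩, ?_⟩, rfl⟩, rfl⟩
    · rw [List.getD_eq_getElem bases [] hj, List.getElem?_eq_getElem hj]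
    · show ((fun p => p.1 == c) ∘ fun p => (PySem.List.slice p.1 (some (-3)) none, p.2)) (bases.getD j [], j) = true
      simp only [Function.comp_apply]
      rw [hkey]
      exact beq_self_eq_true c

-- bounds for the guarded running-max fold
theorem pvFoldStep_ge (i : Nat) (g : Nat → Nat) (m j' : Nat) :
    m ≤ (if j' ≠ i then (let k := g j'; if m < k then k else m) else m) := by
  by_cases h : j' ≠ i
  · rw [if_pos h]
    show m ≤ if m < g j' then g j' else m
    split_ifs <;> omega
  · rw [if_neg h]

theorem pvFoldMax_acc_le (i : Nat) (g : Nat → Nat) :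
    ∀ (S : List Nat) (acc : Nat),
      acc ≤ S.foldl (fun m j => if j ≠ i then (let k := g j; if m < k then k else m) else m) acc := by
  intro S
  induction S with
  | nil => intro acc; simp
  | cons a S ih =>
    intro acc
    rw [List.foldl_cons]
    exact le_trans (pvFoldStep_ge i g acc a) (ih _)

theorem pvFoldMax_le (i : Nat) (g : Nat → Nat) (K : Nat) :
    ∀ (S : List Nat) (acc : Nat), acc ≤ K → (∀ j ∈ S, j ≠ i → g j ≤ K) →
      S.foldl (fun m j => if j ≠ i then (let k := g j; if m < k then k else m) else m) acc ≤ K := by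
  intro S
  induction S with
  | nil => intro acc h _; simpa using h
  | cons a S ih =>
    intro acc hacc hall
    rw [List.foldl_cons]
    refine ih _ ?_ (fun j hj hji => hall j (by simp [hj]) hji)
    by_cases ha : a ≠ i
    · rw [if_pos ha]
      have := hall a (by simp) ha
      show (if acc < g a then g a else acc) ≤ K
      split_ifs <;> omega
    · rw [if_neg ha]; exact hacc

theorem pvLe_foldMax (i : Nat) (g : Nat → Nat) :
    ∀ (S : List Nat) (acc : Nat) (j : Nat), j ∈ S → j ≠ i →
      g j ≤ S.foldl (fun m j => if j ≠ i then (let k := g j; if m < k then k else m) else m) acc := by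
  intro S
  induction S with
  | nil => intro acc j h; exact absurd h List.not_mem_nil
  | cons a S ih =>
    intro acc j hj hji
    rw [List.foldl_cons]
    rcases List.mem_cons.mp hj with rfl | hjS
    · refine le_trans ?_ (pvFoldMax_acc_le i g S _)
      rw [if_pos hji]
      show g j ≤ if acc < g j then g j else acc
      split_ifs <;> omega
    · exact ih _ j hjS hji

-- the B-side per-element length is the closed-form length
theorem pvAltLen_eq (bases : List (List Char)) (k : Nat) (hk : k < bases.length) :
    pvAltLen bases (pvGroups bases) (bases.getD k []) k = pvLen bases k := by
  by_cases hb3 : (bases.getD k []).length < 3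
  · unfold pvAltLen
    rw [if_pos hb3]
    unfold pvLen
    omega
  · unfold pvAltLen
    rw [if_neg hb3]
    show min (bases.getD k []).length (max 3 (((pvGroups bases).getD (PySem.List.slice (bases.getD k []) (some (-3)) none) []).foldl (fun m j =>
        if j ≠ k then
          let kk := pvCommonSuffixLen (bases.getD k []) (bases.getD j [])
          if m < kk then kk else m
        else m) 0 + 1)) = pvLen bases k
    set S := (pvGroups bases).getD (PySem.List.slice (bases.getD k []) (some (-3)) none) [] with hS
    set mg := S.foldl (fun m j =>
        if j ≠ k then
          let kk := pvCommonSuffixLen (bases.getD k []) (bases.getD j [])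
          if m < kk then kk else m
        else m) 0 with hmg
    have hF1 : mg ≤ pvMax bases k := by
      rw [hmg]
      refine pvFoldMax_le k _ (pvMax bases k) S 0 (Nat.zero_le _) ?_
      intro j hj hji
      have hjn : j < bases.length := ((pvGroups_mem bases _ j).mp hj).1
      show pvCp (bases.getD k []).reverse (bases.getD j []).reverse ≤ pvMax bases k
      unfold pvMax
      exact Finset.le_sup (f := fun j => pvCp (bases.getD k []).reverse (bases.getD j []).reverse)
        (Finset.mem_erase.mpr ⟨hji, Finset.mem_range.mpr hjn⟩)
    have hF2 : pvMax bases k ≤ max mg 2 := by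
      unfold pvMax
      refine Finset.sup_le ?_
      intro j hjmem
      obtain ⟨hjk, hjr⟩ := Finset.mem_erase.mp hjmem
      have hjn : j < bases.length := Finset.mem_range.mp hjr
      rcases Nat.lt_or_ge (pvCp (bases.getD k []).reverse (bases.getD j []).reverse) 3 with hsmall | hbig
      · exact le_trans (by omega) (le_max_right mg 2)
      · have hjlen : 3 ≤ (bases.getD j []).length := by
          have := pvCp_le_right (bases.getD k []).reverse (bases.getD j []).reverse
          rw [List.length_reverse] at this
          omega
        have hkey : PySem.List.slice (bases.getD j []) (some (-3)) none
            = PySem.List.slice (bases.getD k []) (some (-3)) none := by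
          have hcast : (-3 : Int) = -((3 : Nat) : Int) := by norm_num
          rw [hcast, pvSlice_eq_code _ 3 (Or.inl (by omega)), pvSlice_eq_code _ 3 (Or.inl (by omega))]
          unfold pvCode
          refine congrArg _ ?_
          rw [pvTake_eq_iff]
          left
          rw [pvCp_comm]
          omega
        have hjS : j ∈ S := by
          rw [hS, pvGroups_mem]
          exact ⟨hjn, hjlen, hkey⟩
        have := pvLe_foldMax k
          (fun j => pvCommonSuffixLen (bases.getD k []) (bases.getD j [])) S 0 j hjS hjk
        rw [← hmg] at this
        exact le_trans (le_of_eq rfl) (le_trans this (le_max_left mg 2))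
    unfold pvLen
    omega

-- ===== VERDICT (by name: the statement is the Claim_ definition above) =====
theorem build_short_code_summary_py_spec : Claim_equal_build_short_code_summary_py := by
  intro calls _
  show build_short_code_summary_py calls = build_short_code_summary_py_alt calls
  simp only [build_short_code_summary_py, build_short_code_summary_py_alt]
  rw [pvLoopA_final (pvBases calls)]
  refine congrArg _ (congrArg _ ?_)
  refine List.ext_getElem (by simp) ?_
  intro k h1 h2
  have hk : k < (pvBases calls).length := by simpa using h1
  rw [List.getElem_map, List.getElem_map, List.getElem_range, List.getElem_zipIdx]
  have hbk : (pvBases calls)[k] = (pvBases calls).getD k [] := (List.getD_eq_getElem _ [] hk).symm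
  rw [hbk, Nat.zero_add, pvLenList_getD _ k hk, pvAltLen_eq _ k hk]
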